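-- pv_equiv track=rewrite | github.com/sa2209GitHub/tasks-in-python | tasks/mounatins_of_hoiyama.py | get_mountain_weight
-- ===== SOURCE A (Python) =====
-- def get_mountain_weight(peak):
--     weight = 0
--     divergence = 0
--
--     for level in range(peak, int(peak / 2), -1):
--         weight += level
--
--         for width in range(level - 1, level - divergence - 1, -1):
--             weight += width * 2
--
--         divergence += 1;
--
--     return weight
-- ===== SOURCE B (Python) =====
-- def get_mountain_weight(peak):
--     # Closed form: with q = trunc(peak / 2) and n = peak - q levels in the
--     # mountain, the total weight is q*n^2 + n*(n+1)/2 (derived from the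
--     # arithmetic-series sums of the two nested loops).
--     q = peak // 2 if peak >= 0 else -((-peak) // 2)
--     n = peak - q
--     if n <= 0:
--         return 0
--     return q * n * n + n * (n + 1) // 2
-- ===== Notes on version B (the rewrite author's own statement) =====
-- stated objective: faster
-- what changed: Replaced the two nested countdown loops by an O(1) closed-form formula q*n^2 + n*(n+1)/2 (q = trunc(peak/2), n = peak - q) obtained by summing the arithmetic series.
import Mathlib
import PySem

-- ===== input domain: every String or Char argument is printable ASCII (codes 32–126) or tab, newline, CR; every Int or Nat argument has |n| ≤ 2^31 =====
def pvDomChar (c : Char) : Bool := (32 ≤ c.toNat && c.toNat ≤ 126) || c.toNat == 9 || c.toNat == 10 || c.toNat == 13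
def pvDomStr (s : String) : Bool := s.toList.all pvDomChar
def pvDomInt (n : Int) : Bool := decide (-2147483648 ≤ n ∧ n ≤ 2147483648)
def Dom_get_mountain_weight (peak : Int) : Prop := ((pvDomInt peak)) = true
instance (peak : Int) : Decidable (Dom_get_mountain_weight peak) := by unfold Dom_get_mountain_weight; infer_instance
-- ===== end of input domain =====

-- B replaces A's two nested countdown loops by an O(1) closed-form arithmetic-series formula.

-- ===== PORT A =====
-- int(peak / 2): true division then int() truncates toward zero; exact (= Int.tdiv peak 2)
-- for |peak| ≤ 2^31, where the float quotient is exact.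
def get_mountain_weight (peak : Int) : Int :=
  ((PySem.List.pyRange peak (Int.tdiv peak 2) (-1)).foldl
    (fun (s : Int × Int) level =>
      let w := s.1 + level
      let w := (PySem.List.pyRange (level - 1) (level - s.2 - 1) (-1)).foldl
        (fun w width => w + width * 2) w
      (w, s.2 + 1)) ((0 : Int), (0 : Int))).1

-- ===== PORT B =====
def get_mountain_weight_alt (peak : Int) : Int :=
  let q := if 0 ≤ peak then PySem.Int.floordiv peak 2 else -(PySem.Int.floordiv (-peak) 2)
  let n := peak - q
  if n ≤ 0 then 0 else q * n * n + PySem.Int.floordiv (n * (n + 1)) 2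

-- ===== PRECONDITION & SPEC =====
def Spec_get_mountain_weight (peak : Int) (out : Int) : Prop := out = get_mountain_weight_alt peak
instance (peak : Int) (out : Int) : Decidable (Spec_get_mountain_weight peak out) := by unfold Spec_get_mountain_weight; infer_instance

-- ===== CLAIM (what is proved, stated in full; the proofs are below) =====
def Claim_equal_get_mountain_weight : Prop := ∀ (peak : Int), Dom_get_mountain_weight peak → Spec_get_mountain_weight peak (get_mountain_weight peak)

-- ===== LEMMAS AND PROOFS =====

-- 6 × (total weight contributed by m outer iterations starting at level t+m with divergence d)
def pvP (t m d : Int) : Int :=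
  6*m*t + 3*m*(m+1) + 12*d*m*t + 6*d*m*(m+1) + 6*(t+m)*m*(m-1)
  - 2*(m-1)*m*(2*m-1) - 6*m*d*d - 6*d*m*(m-1) - (m-1)*m*(2*m-1) - 6*m*d - 3*m*(m-1)

-- the inner loop adds 2·Σ_{j=1}^{d} (L-j) = d·(2L-d-1)
theorem pv_inner_sum (d : Nat) : ∀ (L w : Int),
    (PySem.List.pyRange (L - 1) (L - d - 1) (-1)).foldl (fun w x => w + x * 2) w
      = w + d * (2 * L - d - 1) := by
  induction d with
  | zero =>
    intro L w
    rw [PySem.List.pyRange_neg_one_eq_nil (by push_cast; omega)]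
    push_cast; ring_nf; rfl
  | succ d ih =>
    intro L w
    rw [PySem.List.pyRange_neg_one_cons (by push_cast; omega)]
    simp only [List.foldl_cons]
    have h1 : L - 1 - 1 = (L - 1) - 1 := by ring
    have h2 : L - (d + 1 : Nat) - 1 = (L - 1) - (d : Int) - 1 := by push_cast; ring
    rw [h2, ih (L - 1)]
    push_cast; ring

theorem pv_outer_sum (m : Nat) : ∀ (t : Int) (d : Nat) (w : Int),
    6 * ((PySem.List.pyRange (t + m) t (-1)).foldl
      (fun (s : Int × Int) level =>
        let w := s.1 + level
        let w := (PySem.List.pyRange (level - 1) (level - s.2 - 1) (-1)).foldl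
          (fun w width => w + width * 2) w
        (w, s.2 + 1)) (w, (d : Int))).1
      = 6 * w + pvP t m d := by
  induction m with
  | zero =>
    intro t d w
    rw [PySem.List.pyRange_neg_one_eq_nil (by push_cast; omega)]
    simp [pvP]
  | succ m ih =>
    intro t d w
    rw [PySem.List.pyRange_neg_one_cons (by push_cast; omega)]
    simp only [List.foldl_cons]
    have hrange : t + (m + 1 : Nat) - 1 = t + (m : Int) := by push_cast; ring
    rw [pv_inner_sum d (t + (m + 1 : Nat))]
    rw [hrange]
    have hd : ((d : Int) + 1) = ((d + 1 : Nat) : Int) := by push_cast; ring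
    rw [hd, ih t (d + 1)]
    simp only [pvP]; push_cast; ring

theorem pv_tdiv_eq (peak : Int) :
    (if 0 ≤ peak then PySem.Int.floordiv peak 2 else -(PySem.Int.floordiv (-peak) 2))
      = Int.tdiv peak 2 := by
  split_ifs with h
  · rw [PySem.Int.floordiv_eq_ediv_of_pos (by omega), Int.tdiv_eq_ediv_of_nonneg h]
  · rw [PySem.Int.floordiv_eq_ediv_of_pos (by omega),
        ← Int.tdiv_eq_ediv_of_nonneg (by omega : (0:Int) ≤ -peak), Int.neg_tdiv, neg_neg]

-- ===== VERDICT (by name: the statement is the Claim_ definition above) =====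
theorem get_mountain_weight_spec : Claim_equal_get_mountain_weight := by
  intro peak _
  unfold Spec_get_mountain_weight get_mountain_weight get_mountain_weight_alt
  rw [pv_tdiv_eq]
  set q := Int.tdiv peak 2 with hq
  by_cases hn : peak - q ≤ 0
  · rw [PySem.List.pyRange_neg_one_eq_nil (by omega)]
    simp [hn]
  · simp only [if_neg hn]
    set m : Nat := (peak - q).toNat with hm
    have hpeak : peak = q + (m : Int) := by omega
    have h6 : 6 * ((PySem.List.pyRange (q + (m : Int)) q (-1)).foldl
      (fun (s : Int × Int) level =>
        let w := s.1 + level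
        let w := (PySem.List.pyRange (level - 1) (level - s.2 - 1) (-1)).foldl
          (fun w width => w + width * 2) w
        (w, s.2 + 1)) ((0 : Int), ((0 : Nat) : Int))).1 = 6 * 0 + pvP q m 0 :=
      pv_outer_sum m q 0 0
    have hdvd : (2 : Int) ∣ (peak - q) * ((peak - q) + 1) := (Int.even_mul_succ_self _).two_dvd
    have hhalf : PySem.Int.floordiv ((peak - q) * ((peak - q) + 1)) 2 * 2
        = (peak - q) * ((peak - q) + 1) := by
      rw [PySem.Int.floordiv_eq_ediv_of_pos (by omega)]
      exact Int.ediv_mul_cancel hdvd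
    rw [hpeak]
    apply mul_left_cancel₀ (by norm_num : (6 : Int) ≠ 0)
    rw [show ((0:Nat):Int) = (0:Int) from rfl] at h6
    rw [h6]
    have hn' : peak - q = (m : Int) := by omega
    rw [hn'] at hhalf
    simp only [pvP]
    have : q + (m:Int) - q = (m:Int) := by ring
    rw [this]
    linear_combination (-3) * hhalf
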